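-- pv_equiv track=rewrite | github.com/DogeMultiverse/watermelonbot | mastermelon/update_mindustry_status2.py | spsb
-- ===== SOURCE A (Python) =====
-- def spsb(stringg):
--     # strip paired square brackets
--     result = ""
--     flag = False
--     for s in stringg:
--         if s == "[" and not flag:
--             flag = True
--         elif flag and s == "]":
--             flag = False
--         elif not flag:
--             result += s
--     return result
-- ===== SOURCE B (Python) =====
-- def spsb(stringg):
--     # find/slice scan: jump from '[' to ']' instead of per-char flag toggling
--     parts = []
--     i = 0
--     while True:
--         j = stringg.find('[', i)
--         if j == -1:
--             parts.append(stringg[i:])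
--             break
--         parts.append(stringg[i:j])
--         k = stringg.find(']', j + 1)
--         if k == -1:
--             break
--         i = k + 1
--     return ''.join(parts)
-- ===== Notes on version B (the rewrite author's own statement) =====
-- stated objective: faster
-- what changed: Replaces A's per-character scan with a boolean inside-brackets flag by a find/slice loop that jumps directly from each '[' to its matching ']' and appends whole slices of untouched text, so kept text is copied in bulk instead of one character at a time.
import Mathlib
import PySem

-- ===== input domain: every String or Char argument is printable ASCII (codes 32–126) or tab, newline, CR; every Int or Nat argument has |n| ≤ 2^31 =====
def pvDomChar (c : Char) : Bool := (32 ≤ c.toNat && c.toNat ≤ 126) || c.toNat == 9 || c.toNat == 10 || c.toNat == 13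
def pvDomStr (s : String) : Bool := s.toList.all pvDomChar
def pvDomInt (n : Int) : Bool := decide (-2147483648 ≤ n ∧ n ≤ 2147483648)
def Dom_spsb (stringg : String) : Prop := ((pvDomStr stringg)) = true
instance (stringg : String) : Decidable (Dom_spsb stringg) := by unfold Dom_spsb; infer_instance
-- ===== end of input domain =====

-- B replaces A's per-character flag-toggling scan by a find/slice loop that jumps
-- from each '[' to its matching ']' (objective: alternative decomposition).


-- ===== PORT A =====
-- A's loop body: the three branches in A's order, over state (result, flag)
def spsbStep (st : List Char × Bool) (s : Char) : List Char × Bool :=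
  if s = '[' ∧ st.2 = false then (st.1, true)
  else if st.2 = true ∧ s = ']' then (st.1, false)
  else if st.2 = false then (st.1 ++ [s], st.2)
  else st

def spsb (stringg : String) : String :=
  String.ofList ((stringg.toList.foldl spsbStep ([], false)).1)

-- ===== PORT B =====
-- B's while loop as structural recursion on the remaining suffix of the string;
-- 'stringg.find("[", i)' / the slice 'stringg[i:j]' on the suffix are exactly
-- dropWhile / takeWhile on it, and 'find("]", j+1)' is dropWhile on the tail after '['.
def spsbGo (l : List Char) : List Char :=
  if (l.dropWhile (· ≠ '[')).isEmpty then
    l.takeWhile (· ≠ '[')                  -- no '[' left: append the whole rest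
  else
    let r := (l.dropWhile (· ≠ '[')).tail  -- text after the found '['
    if (r.dropWhile (· ≠ ']')).isEmpty then
      l.takeWhile (· ≠ '[')                -- unclosed '[': discard the rest
    else
      l.takeWhile (· ≠ '[') ++ spsbGo ((r.dropWhile (· ≠ ']')).tail)
termination_by l.length
decreasing_by
  rename_i h1 h2
  simp only [List.isEmpty_iff] at h1 h2
  have e1 := List.length_dropWhile_le (p := (· ≠ '[')) l
  have e2 := List.length_dropWhile_le (p := (· ≠ ']'))
    ((l.dropWhile (· ≠ '[')).tail)
  have n1 : 0 < (l.dropWhile (· ≠ '[')).length := List.length_pos_iff.mpr h1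
  have n2 : 0 < (((l.dropWhile (· ≠ '[')).tail).dropWhile (· ≠ ']')).length :=
    List.length_pos_iff.mpr h2
  simp [List.length_tail] at *
  omega

def spsb_alt (stringg : String) : String :=
  String.ofList (spsbGo stringg.toList)

-- ===== PRECONDITION & SPEC =====
def Spec_spsb (stringg : String) (out : String) : Prop := out = spsb_alt stringg
instance (stringg : String) (out : String) : Decidable (Spec_spsb stringg out) := by unfold Spec_spsb; infer_instance

-- ===== CLAIM (what is proved, stated in full; the proofs are below) =====
def Claim_equal_spsb : Prop := ∀ (stringg : String), Dom_spsb stringg → Spec_spsb stringg (spsb stringg)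

-- ===== LEMMAS AND PROOFS =====

-- continuation of A's fold after an unmatched '[' was seen: skip to the first ']' (or the end)
def spsbSkip (l : List Char) : List Char :=
  if (l.dropWhile (· ≠ ']')).isEmpty then []
  else spsbGo ((l.dropWhile (· ≠ ']')).tail)

theorem spsbGo_nil : spsbGo [] = [] := by
  rw [spsbGo]; simp

theorem spsbGo_cons_open (t : List Char) : spsbGo ('[' :: t) = spsbSkip t := by
  rw [spsbGo, spsbSkip]
  simp

theorem spsbGo_cons_ne (c : Char) (t : List Char) (hc : c ≠ '[') :
    spsbGo (c :: t) = c :: spsbGo t := by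
  conv_lhs => rw [spsbGo]
  conv_rhs => rw [spsbGo]
  simp only [List.dropWhile_cons, List.takeWhile_cons, hc, ne_eq, decide_not]
  split_ifs <;> simp_all

theorem spsbSkip_nil : spsbSkip [] = [] := by
  rw [spsbSkip]; simp

theorem spsbSkip_cons_close (t : List Char) : spsbSkip (']' :: t) = spsbGo t := by
  rw [spsbSkip]
  simp

theorem spsbSkip_cons_ne (c : Char) (t : List Char) (hc : c ≠ ']') :
    spsbSkip (c :: t) = spsbSkip t := by
  conv_lhs => rw [spsbSkip]
  conv_rhs => rw [spsbSkip]
  simp only [List.dropWhile_cons, hc, ne_eq, not_false_iff, decide_true, if_true]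

-- joint invariant: A's fold from flag = false computes acc ++ spsbGo l,
-- and from flag = true computes acc ++ spsbSkip l
theorem spsb_fold_inv (l : List Char) : ∀ acc : List Char,
    (l.foldl spsbStep (acc, false)).1 = acc ++ spsbGo l ∧
    (l.foldl spsbStep (acc, true)).1 = acc ++ spsbSkip l := by
  induction l with
  | nil => intro acc; simp [spsbGo_nil, spsbSkip_nil]
  | cons c t ih =>
    intro acc
    constructor
    · by_cases hc : c = '['
      · subst hc
        have hs : spsbStep (acc, false) '[' = (acc, true) := by simp [spsbStep]
        rw [List.foldl_cons, hs, (ih acc).2, spsbGo_cons_open]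
      · have hs : spsbStep (acc, false) c = (acc ++ [c], false) := by
          simp [spsbStep, hc]
        rw [List.foldl_cons, hs, (ih (acc ++ [c])).1, spsbGo_cons_ne c t hc]
        simp
    · by_cases hc : c = ']'
      · subst hc
        have hs : spsbStep (acc, true) ']' = (acc, false) := by simp [spsbStep]
        rw [List.foldl_cons, hs, (ih acc).1, spsbSkip_cons_close]
      · have hs : spsbStep (acc, true) c = (acc, true) := by
          simp [spsbStep, hc]
        rw [List.foldl_cons, hs, (ih acc).2, spsbSkip_cons_ne c t hc]

-- ===== VERDICT (by name: the statement is the Claim_ definition above) =====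
theorem spsb_spec : Claim_equal_spsb := by
  intro stringg _
  unfold Spec_spsb spsb spsb_alt
  rw [(spsb_fold_inv stringg.toList []).1]
  simp
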